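-- pv_equiv track=rewrite | github.com/JeMorriso/PySBR | pysbr/queries/lines.py | _tally_points
-- ===== SOURCE A (Python) =====
-- import copy
--
-- def _tally_points(line, period_scores, market_range):
--     scores = copy.deepcopy(period_scores)
--     if market_range is not None:
--         scores = [s for s in period_scores if s.get("period") in market_range]
--
--     participant_id = line.get("participant id")
--     o_scores = []
--     if participant_id not in [15143, 15144]:
--         scores = [
--             s for s in period_scores if s.get("participant id") == participant_id
--         ]
--         o_scores = [
--             s for s in period_scores if s.get("participant id") != participant_id
--         ]
--
--     try:
--         return sum([s.get("points scored") for s in scores]), sum(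
--             [s.get("points scored") for s in o_scores]
--         )
--     except TypeError:
--         return None, None
-- ===== SOURCE B (Python) =====
-- def _tally_points(line, period_scores, market_range):
--     participant_id = line.get("participant id")
--     try:
--         if participant_id in (15143, 15144):
--             return sum(
--                 s.get("points scored")
--                 for s in period_scores
--                 if market_range is None or s.get("period") in market_range
--             ), 0
--         # group-by table: one pass builds per-participant totals,
--         # then the answer is read off the table
--         totals = {}
--         for s in period_scores:
--             k = s.get("participant id")
--             totals[k] = totals.get(k, 0) + s.get("points scored")
--         p_total = totals.pop(participant_id, 0)
--         return p_total, sum(totals.values())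
--     except TypeError:
--         return None, None
-- ===== Notes on version B (the rewrite author's own statement) =====
-- stated objective: alternative
-- what changed: For a general participant A partitions period_scores into two filtered lists and sums each; B instead makes one group-by pass building a per-participant-id totals dictionary and reads the participant's total and the sum of the remaining table entries off it (special participants get a single filtered generator sum); the try/except TypeError behaviour on missing/None points is preserved.
import Mathlib
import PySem

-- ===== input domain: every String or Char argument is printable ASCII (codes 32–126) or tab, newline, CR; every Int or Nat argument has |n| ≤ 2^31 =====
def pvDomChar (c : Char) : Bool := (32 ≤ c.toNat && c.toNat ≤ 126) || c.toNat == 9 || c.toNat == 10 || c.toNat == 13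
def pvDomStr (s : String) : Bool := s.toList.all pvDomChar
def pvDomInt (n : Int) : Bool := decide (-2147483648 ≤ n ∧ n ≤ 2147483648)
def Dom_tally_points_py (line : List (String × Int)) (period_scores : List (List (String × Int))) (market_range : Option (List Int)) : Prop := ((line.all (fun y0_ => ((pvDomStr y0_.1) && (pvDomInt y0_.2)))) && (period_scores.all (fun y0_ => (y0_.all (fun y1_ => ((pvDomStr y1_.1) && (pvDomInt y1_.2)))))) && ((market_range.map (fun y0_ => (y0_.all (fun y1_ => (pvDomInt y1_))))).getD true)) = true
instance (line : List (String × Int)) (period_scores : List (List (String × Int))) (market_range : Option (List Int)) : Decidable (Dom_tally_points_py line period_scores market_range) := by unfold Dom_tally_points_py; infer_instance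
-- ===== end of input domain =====

-- B replaces A's partition-into-two-lists-and-sum-each by a single group-by pass that builds a
-- per-participant totals dictionary and reads the answer off the table (objective: alternative).

-- ===== PORT A =====
-- dict.get on a string-keyed dict: first matching pair (dicts have unique keys)
def pvGet (d : List (String × Int)) (k : String) : Option Int :=
  (d.find? (fun p => p.1 == k)).map (·.2)

-- Python's sum over a list of Optional ints: None anywhere = TypeError = none
def pySum (acc : Option Int) (l : List (Option Int)) : Option Int :=
  l.foldl (fun a x => match a, x with
    | some a, some v => some (a + v)
    | _, _ => none) acc

def tally_points_py (line : List (String × Int)) (period_scores : List (List (String × Int))) (market_range : Option (List Int)) : Option Int × Option Int :=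
  let scores0 := match market_range with
    | none => period_scores
    | some r => period_scores.filter (fun s => match pvGet s "period" with
        | some p => r.contains p
        | none => false)
  let pid := pvGet line "participant id"
  let special := pid == some 15143 || pid == some 15144
  let scores := if special then scores0
    else period_scores.filter (fun s => pvGet s "participant id" == pid)
  let o_scores : List (List (String × Int)) := if special then []
    else period_scores.filter (fun s => pvGet s "participant id" != pid)
  -- try: return sum(...), sum(...) except TypeError: return None, None
  match pySum (some 0) (scores.map (fun s => pvGet s "points scored")),
        pySum (some 0) (o_scores.map (fun s => pvGet s "points scored")) with
  | some a, some b => (some a, some b)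
  | _, _ => (none, none)

-- ===== PORT B =====
def altPeriodOk (mr : Option (List Int)) (s : List (String × Int)) : Bool :=
  match mr with
  | none => true
  | some r => match pvGet s "period" with
    | some p => r.contains p
    | none => false

-- special participant: sum(genexpr over matching periods); a missing "points scored" is the TypeError
def altSumSpecial (mr : Option (List Int)) : List (List (String × Int)) → Int → Option Int
  | [], acc => some acc
  | s :: rest, acc =>
    if altPeriodOk mr s then
      match pvGet s "points scored" with
      | some v => altSumSpecial mr rest (acc + v)
      | none => none
    else altSumSpecial mr rest acc

-- the group-by loop: totals[k] = totals.get(k, 0) + s.get("points scored"); None pts = TypeError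
def altBuild : List (List (String × Int)) → PySem.Dict (Option Int) Int → Option (PySem.Dict (Option Int) Int)
  | [], d => some d
  | s :: rest, d =>
    match pvGet s "points scored" with
    | some v => altBuild rest (d.insert (pvGet s "participant id") (d.getD (pvGet s "participant id") 0 + v))
    | none => none

def tally_points_py_alt (line : List (String × Int)) (period_scores : List (List (String × Int))) (market_range : Option (List Int)) : Option Int × Option Int :=
  let pid := pvGet line "participant id"
  if pid == some 15143 || pid == some 15144 then
    match altSumSpecial market_range period_scores 0 with
    | some t => (some t, some 0)
    | none => (none, none)
  else
    match altBuild period_scores PySem.Dict.empty with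
    | some totals =>
      -- p_total = totals.pop(pid, 0); return p_total, sum(totals.values())
      (some (totals.getD pid 0), some ((totals.erase pid).values.sum))
    | none => (none, none)

-- ===== PRECONDITION & SPEC =====
def Spec_tally_points_py (line : List (String × Int)) (period_scores : List (List (String × Int))) (market_range : Option (List Int)) (out : Option Int × Option Int) : Prop := out = tally_points_py_alt line period_scores market_range
instance (line : List (String × Int)) (period_scores : List (List (String × Int))) (market_range : Option (List Int)) (out : Option Int × Option Int) : Decidable (Spec_tally_points_py line period_scores market_range out) := by unfold Spec_tally_points_py; infer_instance

-- ===== CLAIM (what is proved, stated in full; the proofs are below) =====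
def Claim_equal_tally_points_py : Prop := ∀ (line : List (String × Int)) (period_scores : List (List (String × Int))) (market_range : Option (List Int)), Dom_tally_points_py line period_scores market_range → Spec_tally_points_py line period_scores market_range (tally_points_py line period_scores market_range)

-- ===== LEMMAS AND PROOFS =====

theorem pySum_none (l : List (Option Int)) : pySum none l = none := by
  induction l with
  | nil => rfl
  | cons x rest ih => cases x <;> exact ih

theorem pySum_cons (acc : Int) (x : Option Int) (l : List (Option Int)) :
    pySum (some acc) (x :: l) = match x with
      | some v => pySum (some (acc + v)) l
      | none => none := by
  cases x with
  | none => exact pySum_none l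
  | some v => rfl

theorem pySum_none_of_mem (a : Int) (l : List (Option Int)) (h : none ∈ l) :
    pySum (some a) l = none := by
  induction l generalizing a with
  | nil => cases h
  | cons x rest ih =>
    cases x with
    | none => exact pySum_none rest
    | some v =>
      rw [pySum_cons]
      exact ih (a + v) (by simpa using h)

theorem pySum_some_of_not_mem (a : Int) (l : List (Option Int)) (h : none ∉ l) :
    pySum (some a) l = some (a + (l.map (fun o => o.getD 0)).sum) := by
  induction l generalizing a with
  | nil => simp [pySum]
  | cons x rest ih =>
    cases x with
    | none => exact absurd (List.mem_cons_self) h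
    | some v =>
      rw [pySum_cons]
      have := ih (a + v) (fun hm => h (List.mem_cons_of_mem _ hm))
      simpa [add_assoc] using this

theorem altSumSpecial_eq (mr : Option (List Int)) (l : List (List (String × Int))) (acc : Int) :
    altSumSpecial mr l acc =
      pySum (some acc) ((l.filter (altPeriodOk mr)).map (fun s => pvGet s "points scored")) := by
  induction l generalizing acc with
  | nil => rfl
  | cons s rest ih =>
    by_cases h : altPeriodOk mr s
    · cases hv : pvGet s "points scored" with
      | some v => simp [altSumSpecial, h, hv, pySum_cons, ih]
      | none => simp [altSumSpecial, h, hv, pySum_cons]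
    · simp [altSumSpecial, h, ih]

-- sum of a projected filter splits a list into the matching and non-matching parts
theorem sum_map_filter_partition (l : List (List (String × Int))) (p : List (String × Int) → Bool)
    (f : List (String × Int) → Int) :
    ((l.filter p).map f).sum + ((l.filter (fun s => !p s)).map f).sum = (l.map f).sum := by
  induction l with
  | nil => simp
  | cons x t ih => by_cases h : p x <;> simp [h, ← ih] <;> ring

-- items of an insert under a non-matching head commute past the head
theorem insert_items_cons (p : Option Int × Int) (t : List (Option Int × Int)) (k : Option Int)
    (v : Int) (hp : (p.1 == k) = false) :
    ((PySem.Dict.mk (p :: t)).insert k v).items = p :: ((PySem.Dict.mk t).insert k v).items := by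
  by_cases hc : (PySem.Dict.mk t).contains k
  · have hc' : (PySem.Dict.mk (p :: t)).contains k := by
      simp [PySem.Dict.contains] at hc ⊢
      exact Or.inr hc
    have hp' : p.1 ≠ k := by simpa using hp
    simp [PySem.Dict.insert, hc, hc', hp']
  · have hc' : ¬ (PySem.Dict.mk (p :: t)).contains k := by
      simp [PySem.Dict.contains] at hc ⊢
      exact ⟨by simpa using hp, hc⟩
    simp [PySem.Dict.insert, hc, hc']

theorem getD_mk_cons (p : Option Int × Int) (t : List (Option Int × Int)) (k : Option Int) :
    (PySem.Dict.mk (p :: t)).getD k 0 = if (p.1 == k) then p.2 else (PySem.Dict.mk t).getD k 0 := by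
  by_cases hp : (p.1 == k) <;> simp [PySem.Dict.getD, PySem.Dict.get?, List.find?, hp]

-- sum of the values after an insert, on a dict with distinct keys
theorem valuesSum_insert (ps : List (Option Int × Int)) (k : Option Int) (v : Int)
    (h : (ps.map (·.1)).Nodup) :
    ((PySem.Dict.mk ps).insert k v).values.sum = (ps.map (·.2)).sum + v - (PySem.Dict.mk ps).getD k 0 := by
  induction ps with
  | nil => simp [PySem.Dict.insert, PySem.Dict.contains, PySem.Dict.values, PySem.Dict.getD, PySem.Dict.get?]
  | cons p t ih =>
    by_cases hp : (p.1 == k)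
    · have hpk : p.1 = k := by simpa using hp
      have hnt : ∀ q ∈ t, (q.1 == k) = false := by
        intro q hq
        have : q.1 ≠ p.1 := by
          intro he
          have : p.1 ∈ t.map (·.1) := he ▸ List.mem_map_of_mem hq
          exact (List.nodup_cons.mp h).1 this
        simp [hpk ▸ this]
      have hc : (PySem.Dict.mk (p :: t)).contains k := by
        simp [PySem.Dict.contains]; exact Or.inl (by simpa using hp)
      have hmap : t.map (fun q => if (q.1 == k) = true then (k, v) else q) = t := by
        calc t.map (fun q => if (q.1 == k) = true then (k, v) else q)
            = t.map id := List.map_congr_left (fun q hq => by simp [hnt q hq])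
          _ = t := List.map_id t
      simp only [PySem.Dict.insert, hc, if_pos, PySem.Dict.values, PySem.Dict.items,
        List.map_cons, hp, if_true, getD_mk_cons]
      rw [hmap]
      simp; ring
    · have hmk := insert_items_cons p t k v (by simpa using hp)
      have ih' := ih (List.nodup_cons.mp h).2
      simp only [PySem.Dict.values] at ih' ⊢
      rw [hmk]
      simp only [List.map_cons, List.sum_cons, ih', getD_mk_cons, hp, if_false]
      simp only [Bool.false_eq_true, if_false]
      ring

-- sum of the values after an erase, on a dict with distinct keys
theorem valuesSum_erase (ps : List (Option Int × Int)) (k : Option Int)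
    (h : (ps.map (·.1)).Nodup) :
    ((PySem.Dict.mk ps).erase k).values.sum = (ps.map (·.2)).sum - (PySem.Dict.mk ps).getD k 0 := by
  induction ps with
  | nil => simp [PySem.Dict.erase, PySem.Dict.values, PySem.Dict.getD, PySem.Dict.get?]
  | cons p t ih =>
    have ih' := ih (List.nodup_cons.mp h).2
    by_cases hp : (p.1 == k)
    · have hpk : p.1 = k := by simpa using hp
      have hnt : ∀ q ∈ t, (q.1 == k) = false := by
        intro q hq
        have : q.1 ≠ p.1 := by
          intro he
          have : p.1 ∈ t.map (·.1) := he ▸ List.mem_map_of_mem hq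
          exact (List.nodup_cons.mp h).1 this
        simp [hpk ▸ this]
      have hfil : t.filter (fun q => !(q.1 == k)) = t := by
        apply List.filter_eq_self.mpr
        intro q hq; simp [hnt q hq]
      simp only [PySem.Dict.erase, PySem.Dict.values, PySem.Dict.items, List.filter_cons, hp,
        Bool.not_true, getD_mk_cons, if_true]
      simp [hfil]
    · simp only [PySem.Dict.erase, PySem.Dict.values, PySem.Dict.items, List.filter_cons, hp,
        Bool.not_false, getD_mk_cons, if_false]
      simp only [PySem.Dict.erase, PySem.Dict.values] at ih'
      simp [ih']
      ring

-- the group-by loop invariant: failure = a missing "points scored"; success = per-key totals and grand total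
theorem altBuild_spec (l : List (List (String × Int))) : ∀ (d : PySem.Dict (Option Int) Int),
    d.keys.Nodup →
    (altBuild l d = none → ∃ s ∈ l, pvGet s "points scored" = none) ∧
    (∀ d', altBuild l d = some d' →
      (∀ s ∈ l, pvGet s "points scored" ≠ none) ∧ d'.keys.Nodup ∧
      (∀ k, d'.getD k 0 = d.getD k 0 +
        ((l.filter (fun s => pvGet s "participant id" == k)).map (fun s => (pvGet s "points scored").getD 0)).sum) ∧
      d'.values.sum = d.values.sum + (l.map (fun s => (pvGet s "points scored").getD 0)).sum) := by
  induction l with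
  | nil =>
    intro d hnd
    refine ⟨by simp [altBuild], ?_⟩
    intro d' hd'
    simp only [altBuild, Option.some.injEq] at hd'
    subst hd'
    exact ⟨by simp, hnd, by simp, by simp⟩
  | cons s rest ih =>
    intro d hnd
    cases hv : pvGet s "points scored" with
    | none =>
      refine ⟨fun _ => ⟨s, List.mem_cons_self, hv⟩, ?_⟩
      intro d' hd'
      simp [altBuild, hv] at hd'
    | some v =>
      have hnd' : (d.insert (pvGet s "participant id") (d.getD (pvGet s "participant id") 0 + v)).keys.Nodup :=
        PySem.Dict.nodup_keys_insert _ _ _ hnd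
      have ih' := ih _ hnd'
      constructor
      · intro hnone
        simp only [altBuild, hv] at hnone
        obtain ⟨t, ht, htv⟩ := ih'.1 hnone
        exact ⟨t, List.mem_cons_of_mem _ ht, htv⟩
      · intro d' hd'
        simp only [altBuild, hv] at hd'
        obtain ⟨hall, hnd'', hgetD, hvals⟩ := ih'.2 d' hd'
        refine ⟨?_, hnd'', ?_, ?_⟩
        · intro t ht
          rcases List.mem_cons.mp ht with h1 | h2
          · subst h1; simp [hv]
          · exact hall t h2
        · intro k
          rw [hgetD k, PySem.Dict.getD_insert]
          by_cases hk : pvGet s "participant id" = k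
          · rw [if_pos hk.symm]
            simp [List.filter_cons, hk, hv]; ring
          · have hbk : (pvGet s "participant id" == k) = false := by simpa using hk
            rw [if_neg (fun he => hk he.symm)]
            simp [hbk]
        · rw [hvals]
          obtain ⟨ps⟩ := d
          rw [show (PySem.Dict.mk ps).insert (pvGet s "participant id")
                ((PySem.Dict.mk ps).getD (pvGet s "participant id") 0 + v) =
              (PySem.Dict.mk ps).insert (pvGet s "participant id")
                ((PySem.Dict.mk ps).getD (pvGet s "participant id") 0 + v) from rfl,
            valuesSum_insert ps _ _ (by simpa [PySem.Dict.keys] using hnd)]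
          simp only [PySem.Dict.values, hv, List.map_cons, List.sum_cons, Option.getD_some]
          ring

-- ===== VERDICT (by name: the statement is the Claim_ definition above) =====
theorem tally_points_py_spec : Claim_equal_tally_points_py := by
  intro line ps mr hdom
  clear hdom
  unfold Spec_tally_points_py tally_points_py tally_points_py_alt
  by_cases hsp : (pvGet line "participant id" == some 15143 || pvGet line "participant id" == some 15144) = true
  · simp only [hsp, if_pos]
    rw [altSumSpecial_eq]
    have hsc : (match mr with
        | none => ps
        | some r => ps.filter (fun s => match pvGet s "period" with
            | some p => r.contains p
            | none => false)) = ps.filter (altPeriodOk mr) := by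
      cases mr with
      | none => simp [show altPeriodOk none = fun _ => true from rfl]
      | some r => rfl
    rw [hsc]
    cases pySum (some 0) ((ps.filter (altPeriodOk mr)).map (fun s => pvGet s "points scored")) <;>
      simp [pySum]
  · simp only [Bool.not_eq_true] at hsp
    simp only [hsp, Bool.false_eq_true, if_neg, not_false_iff]
    have hspec := altBuild_spec ps PySem.Dict.empty (by simp [PySem.Dict.empty, PySem.Dict.keys])
    set pid := pvGet line "participant id" with hpid
    cases hb : altBuild ps PySem.Dict.empty with
    | none =>
      obtain ⟨s0, hs0, hsv⟩ := hspec.1 hb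
      by_cases hk : (pvGet s0 "participant id" == pid) = true
      · have hmem : (none : Option Int) ∈ (ps.filter (fun s => pvGet s "participant id" == pid)).map
            (fun s => pvGet s "points scored") :=
          List.mem_map.mpr ⟨s0, List.mem_filter.mpr ⟨hs0, hk⟩, hsv⟩
        rw [pySum_none_of_mem _ _ hmem]
      · have hk' : (pvGet s0 "participant id" != pid) = true := by
          simp [bne]; simpa using hk
        have hmem : (none : Option Int) ∈ (ps.filter (fun s => pvGet s "participant id" != pid)).map
            (fun s => pvGet s "points scored") :=
          List.mem_map.mpr ⟨s0, List.mem_filter.mpr ⟨hs0, hk'⟩, hsv⟩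
        rw [pySum_none_of_mem _ _ hmem]
        cases pySum (some 0) ((ps.filter (fun s => pvGet s "participant id" == pid)).map
            (fun s => pvGet s "points scored")) <;> rfl
    | some d' =>
      obtain ⟨hall, hnd'', hgetD, hvals⟩ := hspec.2 d' hb
      have hnm : ∀ (q : List (List (String × Int))), (∀ x ∈ q, x ∈ ps) →
          (none : Option Int) ∉ q.map (fun s => pvGet s "points scored") := by
        intro q hq hmem
        obtain ⟨s0, hs0, hv0⟩ := List.mem_map.mp hmem
        exact hall s0 (hq s0 hs0) hv0
      rw [pySum_some_of_not_mem 0 _ (hnm _ (fun x hx => (List.mem_filter.mp hx).1)),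
          pySum_some_of_not_mem 0 _ (hnm _ (fun x hx => (List.mem_filter.mp hx).1))]
      have hpart := sum_map_filter_partition ps (fun s => pvGet s "participant id" == pid)
        (fun s => (pvGet s "points scored").getD 0)
      have hfil : ps.filter (fun s => pvGet s "participant id" != pid)
          = ps.filter (fun s => !(pvGet s "participant id" == pid)) := rfl
      obtain ⟨qs⟩ := d'
      dsimp only
      have hze : (PySem.Dict.empty : PySem.Dict (Option Int) Int).getD pid 0 = 0 := rfl
      have hzv : (PySem.Dict.empty : PySem.Dict (Option Int) Int).values.sum = 0 := rfl
      have hged := hgetD pid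
      have hva := hvals
      rw [hze, zero_add] at hged
      rw [hzv, zero_add] at hva
      simp only [PySem.Dict.values] at hva
      rw [valuesSum_erase qs pid (by simpa [PySem.Dict.keys] using hnd'')]
      refine Prod.ext ?_ ?_ <;> simp only [List.map_map, Function.comp_def, zero_add]
      · rw [hged]
      · rw [hva, hged, hfil]
        congr 1
        linarith [hpart]
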